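-- pv_equiv track=rewrite | github.com/brianjhcho/Mikai | infra/graphiti/sidecar/ingest.py | parse_claude_turns
-- ===== SOURCE A (Python) =====
-- def parse_claude_turns(raw_content: str) -> list[dict]:
--     """Split a Claude thread dump into a list of {role, content} turns.
--
--     The dump uses inline prefixes:
--       [User]: <text>
--       [Assistant]: <text>
--     A turn may span multiple lines; lines without a prefix belong to the
--     current turn.
--     """
--     turns: list[dict] = []
--     current_role: str | None = None
--     current_lines: list[str] = []
--
--     for line in raw_content.split("\n"):
--         if line.startswith("[User]:"):
--             if current_role:
--                 turns.append({
--                     "role": current_role,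
--                     "content": "\n".join(current_lines).strip(),
--                 })
--             current_role = "user"
--             current_lines = [line[7:].strip()]
--         elif line.startswith("[Assistant]:"):
--             if current_role:
--                 turns.append({
--                     "role": current_role,
--                     "content": "\n".join(current_lines).strip(),
--                 })
--             current_role = "assistant"
--             current_lines = [line[12:].strip()]
--         else:
--             current_lines.append(line)
--
--     if current_role:
--         turns.append({
--             "role": current_role,
--             "content": "\n".join(current_lines).strip(),
--         })
--
--     return turns
-- ===== SOURCE B (Python) =====
-- def _boundary(line):
--     if line.startswith("[User]:"):
--         return ("user", line[7:].strip())
--     if line.startswith("[Assistant]:"):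
--         return ("assistant", line[12:].strip())
--     return None
--
--
-- def parse_claude_turns(raw_content: str) -> list[dict]:
--     """Segment the dump at prefix lines and emit one turn per segment."""
--     lines = raw_content.split("\n")
--     # drop preamble lines before the first prefix line
--     while lines and _boundary(lines[0]) is None:
--         lines = lines[1:]
--     turns = []
--     while lines:
--         role, first = _boundary(lines[0])
--         rest = lines[1:]
--         j = 0
--         while j < len(rest) and _boundary(rest[j]) is None:
--             j += 1
--         turns.append({"role": role,
--                       "content": "\n".join([first] + rest[:j]).strip()})
--         lines = rest[j:]
--     return turns
-- ===== Notes on version B (the rewrite author's own statement) =====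
-- stated objective: alternative
-- what changed: A runs one pass with a current-role/pending-lines accumulator flushed at each prefix line and at the end; B drops the preamble and then repeatedly segments the line list with an inner scan to the next prefix line, emitting one turn per segment.
import Mathlib
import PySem

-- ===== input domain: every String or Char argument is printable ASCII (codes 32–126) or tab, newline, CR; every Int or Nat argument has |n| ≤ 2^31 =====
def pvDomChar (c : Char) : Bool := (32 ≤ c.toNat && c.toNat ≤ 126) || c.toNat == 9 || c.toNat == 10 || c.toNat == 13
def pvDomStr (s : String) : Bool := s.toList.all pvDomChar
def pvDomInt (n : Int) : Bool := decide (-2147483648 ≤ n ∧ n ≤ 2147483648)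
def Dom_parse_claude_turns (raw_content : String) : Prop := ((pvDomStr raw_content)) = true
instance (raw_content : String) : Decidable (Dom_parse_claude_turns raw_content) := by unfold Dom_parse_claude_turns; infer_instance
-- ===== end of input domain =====

-- B replaces A's running accumulator (current role + pending lines, flushed at each
-- boundary and at the end) with a segmentation: drop the preamble, then repeatedly
-- take the lines up to the next prefix line as one turn (objective: alternative).

-- ===== PORT A =====
def pvMkTurn (r c : String) : List (String × String) := [("role", r), ("content", c)]

-- flush the current (role, lines) into a finished turn — Python writes this dict append inline
def pvFlushA (turns : List (List (String × String))) (role : Option String)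
    (cur : List String) : List (List (String × String)) :=
  match role with
  | some r => turns ++ [pvMkTurn r (PySem.Str.strip (PySem.Str.join "\n" cur))]
  | none => turns

-- the body of A's for-loop, on state (turns, current_role, current_lines)
def pvStepA (st : List (List (String × String)) × Option String × List String)
    (line : String) : List (List (String × String)) × Option String × List String :=
  if PySem.Str.startswith line "[User]:" then
    (pvFlushA st.1 st.2.1 st.2.2, some "user",
     [PySem.Str.strip (PySem.Str.slice line (some 7) none)])
  else if PySem.Str.startswith line "[Assistant]:" then
    (pvFlushA st.1 st.2.1 st.2.2, some "assistant",
     [PySem.Str.strip (PySem.Str.slice line (some 12) none)])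
  else
    (st.1, st.2.1, st.2.2 ++ [line])

def parse_claude_turns (raw_content : String) : List (List (String × String)) :=
  let st := ((PySem.Str.split? raw_content "\n").getD []).foldl pvStepA ([], none, [])
  pvFlushA st.1 st.2.1 st.2.2

-- ===== PORT B =====
-- Source B's _boundary helper
def pvBoundary (line : String) : Option (String × String) :=
  if PySem.Str.startswith line "[User]:" then
    some ("user", PySem.Str.strip (PySem.Str.slice line (some 7) none))
  else if PySem.Str.startswith line "[Assistant]:" then
    some ("assistant", PySem.Str.strip (PySem.Str.slice line (some 12) none))
  else none

-- "line is not a boundary" — the condition of Source B's inner scanning loop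
def pvNB (line : String) : Bool := (pvBoundary line).isNone

-- Source B's two while loops (preamble drop + segment emission), as fuel recursion on the
-- number of remaining lines (each iteration consumes ≥ 1 line, so length is enough fuel)
def pvTurnsGo : Nat → List String → List (List (String × String))
  | 0, _ => []
  | _, [] => []
  | fuel + 1, l :: ls =>
    match pvBoundary l with
    | none => pvTurnsGo fuel ls
    | some (role, first) =>
      pvMkTurn role (PySem.Str.strip (PySem.Str.join "\n" (first :: ls.takeWhile pvNB)))
        :: pvTurnsGo fuel (ls.dropWhile pvNB)

def parse_claude_turns_alt (raw_content : String) : List (List (String × String)) :=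
  let lines := (PySem.Str.split? raw_content "\n").getD []
  pvTurnsGo lines.length lines

-- ===== PRECONDITION & SPEC =====
def Spec_parse_claude_turns (raw_content : String) (out : List (List (String × String))) : Prop := out = parse_claude_turns_alt raw_content
instance (raw_content : String) (out : List (List (String × String))) : Decidable (Spec_parse_claude_turns raw_content out) := by unfold Spec_parse_claude_turns; infer_instance

-- ===== CLAIM (what is proved, stated in full; the proofs are below) =====
def Claim_equal_parse_claude_turns : Prop := ∀ (raw_content : String), Dom_parse_claude_turns raw_content → Spec_parse_claude_turns raw_content (parse_claude_turns raw_content)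

-- ===== LEMMAS AND PROOFS =====

-- fuel is irrelevant as long as it covers the list length
theorem pvTurnsGo_irrel : ∀ (f1 f2 : Nat) (xs : List String),
    xs.length ≤ f1 → xs.length ≤ f2 → pvTurnsGo f1 xs = pvTurnsGo f2 xs := by
  intro f1
  induction f1 with
  | zero =>
    intro f2 xs h1 _
    have : xs = [] := List.length_eq_zero_iff.mp (Nat.le_zero.mp h1)
    subst this
    cases f2 <;> simp [pvTurnsGo]
  | succ f1 ih =>
    intro f2 xs h1 h2
    cases xs with
    | nil => cases f2 <;> simp [pvTurnsGo]
    | cons l ls =>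
      cases f2 with
      | zero => simp at h2
      | succ f2 =>
        simp only [pvTurnsGo]
        cases hb : pvBoundary l with
        | none =>
          exact ih f2 ls (by simpa using h1) (by simpa using h2)
        | some p =>
          have hd := List.length_dropWhile_le (p := pvNB) ls
          rw [ih f2 (ls.dropWhile pvNB)
            (le_trans hd (by simpa using h1)) (le_trans hd (by simpa using h2))]

-- pvRun xs: Source B's loop on the remaining lines (fuel normalised to the length)
def pvRun (xs : List String) : List (List (String × String)) := pvTurnsGo xs.length xs

theorem pvRun_cons_none {l : String} (ls : List String) (hb : pvBoundary l = none) :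
    pvRun (l :: ls) = pvRun ls := by
  simp [pvRun, pvTurnsGo, hb]

theorem pvRun_cons_some {l : String} (ls : List String) {r f : String}
    (hb : pvBoundary l = some (r, f)) :
    pvRun (l :: ls) =
      pvMkTurn r (PySem.Str.strip (PySem.Str.join "\n" (f :: ls.takeWhile pvNB)))
        :: pvRun (ls.dropWhile pvNB) := by
  simp only [pvRun, List.length_cons, pvTurnsGo, hb]
  rw [pvTurnsGo_irrel ls.length (ls.dropWhile pvNB).length (ls.dropWhile pvNB)
    (List.length_dropWhile_le _ _) (le_refl _)]

-- boundary facts from the two startswith tests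
theorem pvBoundary_user {l : String} (h : PySem.Str.startswith l "[User]:" = true) :
    pvBoundary l = some ("user", PySem.Str.strip (PySem.Str.slice l (some 7) none)) := by
  simp at h; simp [pvBoundary, h]

theorem pvBoundary_asst {l : String} (h1 : PySem.Str.startswith l "[User]:" = false)
    (h2 : PySem.Str.startswith l "[Assistant]:" = true) :
    pvBoundary l = some ("assistant", PySem.Str.strip (PySem.Str.slice l (some 12) none)) := by
  simp at h1 h2; simp [pvBoundary, h1, h2]

theorem pvBoundary_none {l : String} (h1 : PySem.Str.startswith l "[User]:" = false)
    (h2 : PySem.Str.startswith l "[Assistant]:" = false) :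
    pvBoundary l = none := by
  simp at h1 h2; simp [pvBoundary, h1, h2]

-- the key invariant: A's fold-then-flush, from either kind of state, is B's segmentation
theorem pv_key (ls : List String) :
    (∀ turns cur, (fun st => pvFlushA st.1 st.2.1 st.2.2)
        (ls.foldl pvStepA (turns, none, cur)) = turns ++ pvRun ls)
  ∧ (∀ turns r cur, (fun st => pvFlushA st.1 st.2.1 st.2.2)
        (ls.foldl pvStepA (turns, some r, cur)) =
      turns ++ pvMkTurn r (PySem.Str.strip (PySem.Str.join "\n" (cur ++ ls.takeWhile pvNB)))
        :: pvRun (ls.dropWhile pvNB)) := by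
  induction ls with
  | nil =>
    constructor
    · intro turns cur; simp [pvFlushA, pvRun, pvTurnsGo]
    · intro turns r cur; simp [pvFlushA, pvMkTurn, pvRun, pvTurnsGo]
  | cons l ls ih =>
    have stepU : ∀ (turns : List (List (String × String))) (role : Option String)
        (cur : List String), PySem.Str.startswith l "[User]:" = true →
        pvStepA (turns, role, cur) l =
          (pvFlushA turns role cur, some "user",
           [PySem.Str.strip (PySem.Str.slice l (some 7) none)]) := by
      intro turns role cur h; simp at h; simp [pvStepA, h]
    have stepA : ∀ (turns : List (List (String × String))) (role : Option String)
        (cur : List String), PySem.Str.startswith l "[User]:" = false →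
        PySem.Str.startswith l "[Assistant]:" = true →
        pvStepA (turns, role, cur) l =
          (pvFlushA turns role cur, some "assistant",
           [PySem.Str.strip (PySem.Str.slice l (some 12) none)]) := by
      intro turns role cur h1 h2; simp at h1 h2; simp [pvStepA, h1, h2]
    have stepN : ∀ (turns : List (List (String × String))) (role : Option String)
        (cur : List String), PySem.Str.startswith l "[User]:" = false →
        PySem.Str.startswith l "[Assistant]:" = false →
        pvStepA (turns, role, cur) l = (turns, role, cur ++ [l]) := by
      intro turns role cur h1 h2; simp at h1 h2; simp [pvStepA, h1, h2]
    constructor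
    · intro turns cur
      by_cases hu : PySem.Str.startswith l "[User]:" = true
      · rw [List.foldl_cons, stepU turns none cur hu, ih.2,
          pvRun_cons_some ls (pvBoundary_user hu)]
        simp [pvFlushA]
      · rw [Bool.not_eq_true] at hu
        by_cases ha : PySem.Str.startswith l "[Assistant]:" = true
        · rw [List.foldl_cons, stepA turns none cur hu ha, ih.2,
            pvRun_cons_some ls (pvBoundary_asst hu ha)]
          simp [pvFlushA]
        · rw [Bool.not_eq_true] at ha
          rw [List.foldl_cons, stepN turns none cur hu ha, ih.1,
            pvRun_cons_none ls (pvBoundary_none hu ha)]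
    · intro turns r cur
      by_cases hu : PySem.Str.startswith l "[User]:" = true
      · have hnb : pvNB l = false := by simp [pvNB, pvBoundary_user hu]
        rw [List.foldl_cons, stepU turns (some r) cur hu, ih.2,
          List.takeWhile_cons_of_neg (by simp [hnb]),
          List.dropWhile_cons_of_neg (by simp [hnb]),
          pvRun_cons_some ls (pvBoundary_user hu)]
        simp [pvFlushA]
      · rw [Bool.not_eq_true] at hu
        by_cases ha : PySem.Str.startswith l "[Assistant]:" = true
        · have hnb : pvNB l = false := by simp [pvNB, pvBoundary_asst hu ha]
          rw [List.foldl_cons, stepA turns (some r) cur hu ha, ih.2,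
            List.takeWhile_cons_of_neg (by simp [hnb]),
            List.dropWhile_cons_of_neg (by simp [hnb]),
            pvRun_cons_some ls (pvBoundary_asst hu ha)]
          simp [pvFlushA]
        · rw [Bool.not_eq_true] at ha
          have hnb : pvNB l = true := by simp [pvNB, pvBoundary_none hu ha]
          rw [List.foldl_cons, stepN turns (some r) cur hu ha, ih.2,
            List.takeWhile_cons_of_pos (by simp [hnb]),
            List.dropWhile_cons_of_pos (by simp [hnb])]
          simp

-- ===== VERDICT (by name: the statement is the Claim_ definition above) =====
theorem parse_claude_turns_spec : Claim_equal_parse_claude_turns := by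
  intro raw _
  show parse_claude_turns raw = parse_claude_turns_alt raw
  have h := (pv_key (((PySem.Str.split? raw "\n").getD []))).1 [] []
  simpa [parse_claude_turns, parse_claude_turns_alt, pvRun] using h
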